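-- pv_equiv track=rewrite | github.com/yudai-patronai/problembook | problems/strings/palindrom_function/solution.py | find_palindroms
-- ===== SOURCE A (Python) =====
-- def find_palindroms(string):
--     l = 0
--     r = 0
--     p = [0] * len(string)
--     for i in range(1, len(string)):
--         if r < i:
--             p[i] = 0
--         else:
--             j = l + r - i
--             p[i] = min(r - i, p[j])
--         while p[i] < i and i + p[i] + 1 < len(string) and string[i - p[i] - 1] == string[i + p[i] + 1]:
--             p[i] += 1
--         if i + p[i] > r:
--             l = i - p[i]
--             r = i + p[i]
--     for i in range(len(p)):
--         p[i] = p[i] * 2 + 1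
--     return p
-- ===== SOURCE B (Python) =====
-- def find_palindroms(string):
--     n = len(string)
--     result = []
--     for i in range(n):
--         radius = 0
--         while i - radius - 1 >= 0 and i + radius + 1 < n and string[i - radius - 1] == string[i + radius + 1]:
--             radius += 1
--         result.append(2 * radius + 1)
--     return result
-- ===== Notes on version B (the rewrite author's own statement) =====
-- stated objective: simpler
-- what changed: Replaces Manacher's l/r-window bookkeeping and mirrored-radius seeding with an independent direct center expansion at every index, appending 2*radius+1 as it goes.
import Mathlib
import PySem

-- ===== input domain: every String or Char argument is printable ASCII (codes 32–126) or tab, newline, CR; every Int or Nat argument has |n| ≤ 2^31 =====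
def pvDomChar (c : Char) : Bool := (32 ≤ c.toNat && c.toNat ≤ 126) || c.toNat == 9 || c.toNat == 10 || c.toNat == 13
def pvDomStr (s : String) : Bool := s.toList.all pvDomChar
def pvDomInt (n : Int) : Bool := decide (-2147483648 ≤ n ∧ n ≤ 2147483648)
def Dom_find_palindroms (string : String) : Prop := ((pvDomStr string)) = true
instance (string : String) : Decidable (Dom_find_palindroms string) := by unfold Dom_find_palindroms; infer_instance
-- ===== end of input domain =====

-- B replaces A's Manacher radius-reuse (l/r window + mirrored seed) by a plain
-- independent center expansion at every index: simpler, same return value (no speed claim).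

-- ===== PORT A =====
-- A's inner while loop: "while p[i] < i and i + p[i] + 1 < len(s) and s[i-p[i]-1] == s[i+p[i]+1]: p[i] += 1"
def pvAWhile (cs : List Char) (i : Int) (p : Int) : Int :=
  if h : p < i ∧ i + p + 1 < (cs.length : Int) ∧
      PySem.List.pyGet? cs (i - p - 1) = PySem.List.pyGet? cs (i + p + 1) then
    pvAWhile cs i (p + 1)
  else p
termination_by (i - p).toNat
decreasing_by obtain ⟨h1, -, -⟩ := h; omega

-- the value A first assigns to p[i]: 0, or min(r-i, p[l+r-i])
-- (the read p[l+r-i] is in range by the loop invariant; ported with pyGetD)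
def pvASeed (r i l : Int) (p : List Int) : Int :=
  if r < i then 0 else min (r - i) (PySem.List.pyGetD p (l + r - i) 0)

-- A's main loop over i in range(1, len(s)) with state (l, r, p); p[i] is seeded, then expanded.
def pvALoop (cs : List Char) (i l r : Int) (p : List Int) : List Int :=
  if h : i < (cs.length : Int) then
    if hr : i + pvAWhile cs i (pvASeed r i l p) > r then
      pvALoop cs (i + 1)
        (i - pvAWhile cs i (pvASeed r i l p))
        (i + pvAWhile cs i (pvASeed r i l p))
        (p.set i.toNat (pvAWhile cs i (pvASeed r i l p)))
    else
      pvALoop cs (i + 1) l r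
        (p.set i.toNat (pvAWhile cs i (pvASeed r i l p)))
  else p
termination_by ((cs.length : Int) - i).toNat
decreasing_by all_goals omega

def find_palindroms (string : String) : List Int :=
  (pvALoop string.toList 1 0 0 (List.replicate string.toList.length 0)).map (fun x => x * 2 + 1)

-- ===== PORT B =====
-- B's while loop: "while i - radius - 1 >= 0 and i + radius + 1 < n and s[i-radius-1] == s[i+radius+1]: radius += 1"
def pvBExpand (cs : List Char) (i : Int) (radius : Int) : Int :=
  if h : i - radius - 1 ≥ 0 ∧ i + radius + 1 < (cs.length : Int) ∧
      PySem.List.pyGet? cs (i - radius - 1) = PySem.List.pyGet? cs (i + radius + 1) then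
    pvBExpand cs i (radius + 1)
  else radius
termination_by (i - radius).toNat
decreasing_by obtain ⟨h1, -, -⟩ := h; omega

def find_palindroms_alt (string : String) : List Int :=
  (PySem.List.pyRange 0 string.toList.length 1).map (fun i => 2 * pvBExpand string.toList i 0 + 1)

-- ===== PRECONDITION & SPEC =====
def Spec_find_palindroms (string : String) (out : List Int) : Prop := out = find_palindroms_alt string
instance (string : String) (out : List Int) : Decidable (Spec_find_palindroms string out) := by unfold Spec_find_palindroms; infer_instance

-- ===== CLAIM (what is proved, stated in full; the proofs are below) =====
def Claim_equal_find_palindroms : Prop := ∀ (string : String), Dom_find_palindroms string → Spec_find_palindroms string (find_palindroms string)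

-- ===== LEMMAS AND PROOFS =====

-- the shared while-loop condition at center i, offset k
def pvCond (cs : List Char) (i k : Int) : Prop :=
  k < i ∧ i + k + 1 < (cs.length : Int) ∧
    PySem.List.pyGet? cs (i - k - 1) = PySem.List.pyGet? cs (i + k + 1)

lemma bexp_ge (cs : List Char) (i p : Int) : p ≤ pvBExpand cs i p := by
  induction p using pvBExpand.induct (cs := cs) (i := i) with
  | case1 p h ih =>
    rw [pvBExpand, dif_pos h]; omega
  | case2 p h =>
    rw [pvBExpand, dif_neg h]

lemma bexp_cond (cs : List Char) (i p : Int) :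
    ∀ k, p ≤ k → k < pvBExpand cs i p → pvCond cs i k := by
  induction p using pvBExpand.induct (cs := cs) (i := i) with
  | case1 p h ih =>
    intro k hk1 hk2
    rcases eq_or_lt_of_le hk1 with rfl | hlt
    · exact ⟨by omega, h.2.1, h.2.2⟩
    · exact ih k (by omega) (by rwa [pvBExpand, dif_pos h] at hk2)
  | case2 p h =>
    intro k hk1 hk2
    rw [pvBExpand, dif_neg h] at hk2; omega

lemma bexp_not (cs : List Char) (i p : Int) : ¬ pvCond cs i (pvBExpand cs i p) := by
  induction p using pvBExpand.induct (cs := cs) (i := i) with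
  | case1 p h ih => rwa [pvBExpand, dif_pos h]
  | case2 p h =>
    rw [pvBExpand, dif_neg h]
    intro hc
    obtain ⟨hc1, hc2, hc3⟩ := hc
    exact h ⟨by omega, hc2, hc3⟩

lemma bexp_stable (cs : List Char) (i : Int) (m : Nat)
    (h : ∀ k : Int, 0 ≤ k → k < (m : Int) → pvCond cs i k) :
    pvBExpand cs i 0 = pvBExpand cs i (m : Int) := by
  induction m with
  | zero => rfl
  | succ m ih =>
    obtain ⟨hcm1, hcm2, hcm3⟩ := h m (by omega) (by push_cast; omega)
    have step : pvBExpand cs i (m : Int) = pvBExpand cs i ((m : Int) + 1) := by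
      conv_lhs => rw [pvBExpand]
      rw [dif_pos ⟨by omega, hcm2, hcm3⟩]
    push_cast
    rw [← step]
    exact ih (fun k hk1 hk2 => h k hk1 (by push_cast; omega))

lemma bexp_seed (cs : List Char) (i s0 : Int) (h0 : 0 ≤ s0)
    (hle : s0 ≤ pvBExpand cs i 0) : pvBExpand cs i s0 = pvBExpand cs i 0 := by
  have h := bexp_stable cs i s0.toNat
    (fun k hk1 hk2 => bexp_cond cs i 0 k hk1 (by omega))
  rw [show ((s0.toNat : Int)) = s0 by omega] at h
  exact h.symm

lemma rad_nonneg (cs : List Char) (i : Int) : 0 ≤ pvBExpand cs i 0 := bexp_ge cs i 0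

lemma rad_le (cs : List Char) (i : Int) (hi : 0 ≤ i) : pvBExpand cs i 0 ≤ i := by
  by_contra hlt
  exact absurd (bexp_cond cs i 0 i hi (by omega)).1 (lt_irrefl i)

-- symmetry of the string inside the maximal palindrome around center c
lemma rad_sym (cs : List Char) (c t : Int) (h0 : 0 ≤ t) (hle : t ≤ pvBExpand cs c 0) :
    PySem.List.pyGet? cs (c - t) = PySem.List.pyGet? cs (c + t) := by
  rcases eq_or_lt_of_le h0 with rfl | hpos
  · norm_num
  · obtain ⟨-, -, he⟩ := bexp_cond cs c 0 (t - 1) (by omega) (by omega)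
    have e1 : c - (t - 1) - 1 = c - t := by ring
    have e2 : c + (t - 1) + 1 = c + t := by ring
    rwa [e1, e2] at he

-- the heart of Manacher's correctness: the mirrored seed never overshoots the true radius
lemma seed_le (cs : List Char) (c i : Int) (hc0 : 0 ≤ c) (hci : c < i)
    (hir : i ≤ c + pvBExpand cs c 0) :
    min (c + pvBExpand cs c 0 - i) (pvBExpand cs (2 * c - i) 0) ≤ pvBExpand cs i 0 := by
  set Wc := pvBExpand cs c 0 with hWc
  set j := 2 * c - i with hj
  set Wj := pvBExpand cs j 0 with hWj
  have hWc_le : Wc ≤ c := rad_le cs c hc0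
  have hWc_pos : 0 < Wc := by omega
  have hrn : c + Wc < (cs.length : Int) := by
    have h2 := (bexp_cond cs c 0 (Wc - 1) (by omega) (by omega)).2.1
    omega
  have key : ∀ k : Int, 0 ≤ k → k < min (c + Wc - i) Wj → pvCond cs i k := by
    intro k hk0 hkm
    have hk1 : k < c + Wc - i := lt_of_lt_of_le hkm (min_le_left _ _)
    have hk2 : k < Wj := lt_of_lt_of_le hkm (min_le_right _ _)
    obtain ⟨hkj, hjn, hje⟩ := bexp_cond cs j 0 k hk0 hk2
    refine ⟨by omega, by omega, ?_⟩
    -- s[i+k+1] = s[j-k-1]  (reflect across c)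
    have t1eq : PySem.List.pyGet? cs (c - (i + k + 1 - c)) = PySem.List.pyGet? cs (c + (i + k + 1 - c)) :=
      rad_sym cs c (i + k + 1 - c) (by omega) (by omega)
    have e1 : c - (i + k + 1 - c) = j - k - 1 := by rw [hj]; ring
    have e2 : c + (i + k + 1 - c) = i + k + 1 := by ring
    rw [e1, e2] at t1eq
    -- s[j+k+1] = s[i-k-1]  (reflect across c; the offset may have either sign)
    have t2eq : PySem.List.pyGet? cs (j + k + 1) = PySem.List.pyGet? cs (i - k - 1) := by
      by_cases hu : 0 ≤ i - k - 1 - c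
      · have := rad_sym cs c (i - k - 1 - c) hu (by omega)
        have e3 : c - (i - k - 1 - c) = j + k + 1 := by rw [hj]; ring
        have e4 : c + (i - k - 1 - c) = i - k - 1 := by ring
        rwa [e3, e4] at this
      · have := rad_sym cs c (c - (i - k - 1)) (by omega) (by omega)
        have e3 : c - (c - (i - k - 1)) = i - k - 1 := by ring
        have e4 : c + (c - (i - k - 1)) = j + k + 1 := by rw [hj]; ring
        rw [e3, e4] at this
        exact this.symm
    calc PySem.List.pyGet? cs (i - k - 1)
        = PySem.List.pyGet? cs (j + k + 1) := t2eq.symm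
      _ = PySem.List.pyGet? cs (j - k - 1) := hje.symm
      _ = PySem.List.pyGet? cs (i + k + 1) := t1eq
  by_contra hlt
  push_neg at hlt
  exact bexp_not cs i 0 (key (pvBExpand cs i 0) (rad_nonneg cs i) hlt)

-- A's while loop and B's while loop are the same loop (the guards are equivalent)
lemma awhile_eq (cs : List Char) (i p : Int) : pvAWhile cs i p = pvBExpand cs i p := by
  induction p using pvAWhile.induct (cs := cs) (i := i) with
  | case1 p h ih =>
    rw [pvAWhile, dif_pos h, ih]
    conv_rhs => rw [pvBExpand]
    rw [dif_pos ⟨by omega, h.2.1, h.2.2⟩]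
  | case2 p h =>
    rw [pvAWhile, dif_neg h]
    rw [pvBExpand, dif_neg]
    intro hc
    obtain ⟨hc1, hc2, hc3⟩ := hc
    exact h ⟨by omega, hc2, hc3⟩

lemma pyGetD_set (p : List Int) (i j v : Int) (hi0 : 0 ≤ i) (hil : i < (p.length : Int))
    (hj0 : 0 ≤ j) (hjl : j < (p.length : Int)) :
    PySem.List.pyGetD (p.set i.toNat v) j 0 = if j = i then v else PySem.List.pyGetD p j 0 := by
  have hl1 : j < (((p.set i.toNat v).length : Nat) : Int) := by simpa using hjl
  rw [PySem.List.pyGetD_eq_getElem _ 0 hj0 hl1, PySem.List.pyGetD_eq_getElem _ 0 hj0 hjl]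
  rw [List.getElem_set]
  split_ifs with h1 h2 h3 <;> first | rfl | omega

lemma loopA_len (cs : List Char) (i l r : Int) (p : List Int) :
    (pvALoop cs i l r p).length = p.length := by
  induction i, l, r, p using pvALoop.induct (cs := cs) with
  | case1 i l r p h hr ih => rw [pvALoop, dif_pos h, dif_pos hr, ih, List.length_set]
  | case2 i l r p h hr ih => rw [pvALoop, dif_pos h, dif_neg hr, ih, List.length_set]
  | case3 i l r p h => rw [pvALoop, dif_neg h]

-- the seeded-and-expanded p[i] of A's loop equals B's radius at i
lemma loopA_step (cs : List Char) (i l r : Int) (p : List Int)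
    (h1 : 1 ≤ i) (hlen : p.length = cs.length)
    (hp : ∀ j : Int, 0 ≤ j → j < i → PySem.List.pyGetD p j 0 = pvBExpand cs j 0)
    (hc : ∃ c, 0 ≤ c ∧ c < i ∧ l = c - pvBExpand cs c 0 ∧ r = c + pvBExpand cs c 0)
    (h : i < (cs.length : Int)) :
    pvAWhile cs i (pvASeed r i l p) = pvBExpand cs i 0 := by
  rw [awhile_eq, pvASeed]
  split_ifs with hri
  · rfl
  · obtain ⟨c, hc0, hci, hl, hr⟩ := hc
    have hWc_le : pvBExpand cs c 0 ≤ c := rad_le cs c hc0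
    have hWc0 : 0 ≤ pvBExpand cs c 0 := rad_nonneg cs c
    have hje : l + r - i = 2 * c - i := by omega
    have hj0 : 0 ≤ 2 * c - i := by omega
    have hji : 2 * c - i < i := by omega
    rw [hje, hp (2 * c - i) hj0 hji]
    have hmin := seed_le cs c i hc0 hci (by omega)
    have hWj0 : 0 ≤ pvBExpand cs (2 * c - i) 0 := rad_nonneg cs (2 * c - i)
    exact bexp_seed cs i _ (by omega) (by rw [hr]; exact hmin)

lemma loopA_spec (cs : List Char) (i l r : Int) (p : List Int) :
    1 ≤ i → p.length = cs.length →
    (∀ j : Int, 0 ≤ j → j < i → PySem.List.pyGetD p j 0 = pvBExpand cs j 0) →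
    (∃ c, 0 ≤ c ∧ c < i ∧ l = c - pvBExpand cs c 0 ∧ r = c + pvBExpand cs c 0) →
    ∀ j : Int, 0 ≤ j → j < (cs.length : Int) →
      PySem.List.pyGetD (pvALoop cs i l r p) j 0 = pvBExpand cs j 0 := by
  induction i, l, r, p using pvALoop.induct (cs := cs) with
  | case1 i l r p h hr ih =>
    intro h1 hlen hp hc
    have hpi := loopA_step cs i l r p h1 hlen hp hc h
    rw [pvALoop, dif_pos h, dif_pos hr]
    refine ih (by omega) (by rw [List.length_set]; exact hlen) ?_ ?_
    · intro j hj0 hji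
      rw [pyGetD_set p i j _ (by omega) (by omega) hj0 (by omega)]
      split_ifs with hji'
      · subst hji'; exact hpi
      · exact hp j hj0 (by omega)
    · exact ⟨i, by omega, by omega, by rw [hpi], by rw [hpi]⟩
  | case2 i l r p h hr ih =>
    intro h1 hlen hp hc
    have hpi := loopA_step cs i l r p h1 hlen hp hc h
    rw [pvALoop, dif_pos h, dif_neg hr]
    obtain ⟨c, hc0, hci, hl, hrr⟩ := hc
    refine ih (by omega) (by rw [List.length_set]; exact hlen) ?_ ⟨c, hc0, by omega, hl, hrr⟩
    · intro j hj0 hji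
      rw [pyGetD_set p i j _ (by omega) (by omega) hj0 (by omega)]
      split_ifs with hji'
      · subst hji'; exact hpi
      · exact hp j hj0 (by omega)
  | case3 i l r p h =>
    intro h1 hlen hp hc j hj0 hjn
    rw [pvALoop, dif_neg h]
    exact hp j hj0 (by omega)

lemma rad_zero (cs : List Char) : pvBExpand cs 0 0 = 0 := by
  rw [pvBExpand, dif_neg]
  intro hc; omega

theorem find_palindroms_eq (s : String) : find_palindroms s = find_palindroms_alt s := by
  unfold find_palindroms find_palindroms_alt
  apply List.ext_getElem
  · rw [List.length_map, List.length_map, loopA_len, List.length_replicate,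
      PySem.List.length_pyRange_one]
    omega
  · intro k hk1 hk2
    rw [List.length_map, loopA_len, List.length_replicate] at hk1
    rw [List.getElem_map, List.getElem_map, PySem.List.getElem_pyRange_one]
    have hL := loopA_spec s.toList 1 0 0 (List.replicate s.toList.length 0)
      (by omega) (by rw [List.length_replicate])
      (fun j hj0 hj1 => by
        have hj : j = 0 := by omega
        subst hj
        rw [rad_zero, PySem.List.pyGetD_zero]
        rcases s.toList with - | ⟨c, cs⟩ <;> rfl)
      ⟨0, le_refl 0, by omega, by simp [rad_zero], by simp [rad_zero]⟩
      (k : Int) (by omega) (by exact_mod_cast hk1)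
    rw [PySem.List.pyGetD_natCast] at hL
    rw [List.getD_eq_getElem _ _ (by rw [loopA_len, List.length_replicate]; exact hk1)] at hL
    rw [hL]
    push_cast
    ring

-- ===== VERDICT (by name: the statement is the Claim_ definition above) =====
theorem find_palindroms_spec : Claim_equal_find_palindroms := by
  intro s _
  unfold Spec_find_palindroms
  exact find_palindroms_eq s
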